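-- pv_equiv track=rewrite | github.com/the-database/trails-in-the-database | extract/11-daybreak-extractscripts-database.py | _resolve_tier
-- ===== SOURCE A (Python) =====
-- def _resolve_tier(stem, suffix, inventory, prefix):
--     """Priority ladder within a single tier (avfc or btlface0_c).
--       1. {prefix}{suffix} — exact model match (respects the variant the
--          game says the character is wearing)
--       2. {prefix}{stem}   — bare (base outfit)
--       3. Any other {prefix}{stem}_* — lowest sorts first
--     Daybreak has no _c15/_c10 variants, so no special outfit priority."""
--     tried = [
--         f'{prefix}{suffix}.webp',
--         f'{prefix}{stem}.webp',
--     ]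
--     for c in tried:
--         if c in inventory:
--             return c
--     variants = sorted(p for p in inventory
--                       if p.startswith(f'{prefix}{stem}_') and p not in tried)
--     if variants:
--         return variants[0]
--     return None
-- ===== SOURCE B (Python) =====
-- def _resolve_tier(stem, suffix, inventory, prefix):
--     exact = f'{prefix}{suffix}.webp'
--     bare = f'{prefix}{stem}.webp'
--     vpre = f'{prefix}{stem}_'
--     has_exact = False
--     has_bare = False
--     best = None
--     for p in inventory:
--         if p == exact:
--             has_exact = True
--         elif p == bare:
--             has_bare = True
--         elif p.startswith(vpre) and (best is None or p < best):
--             best = p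
--     if has_exact:
--         return exact
--     if has_bare:
--         return bare
--     return best
-- ===== Notes on version B (the rewrite author's own statement) =====
-- stated objective: alternative
-- what changed: Replaced the two membership scans plus filtered-sort-then-head by a single classifying pass over inventory that keeps two presence flags and a running lexicographic minimum of the variant names.
import Mathlib
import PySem

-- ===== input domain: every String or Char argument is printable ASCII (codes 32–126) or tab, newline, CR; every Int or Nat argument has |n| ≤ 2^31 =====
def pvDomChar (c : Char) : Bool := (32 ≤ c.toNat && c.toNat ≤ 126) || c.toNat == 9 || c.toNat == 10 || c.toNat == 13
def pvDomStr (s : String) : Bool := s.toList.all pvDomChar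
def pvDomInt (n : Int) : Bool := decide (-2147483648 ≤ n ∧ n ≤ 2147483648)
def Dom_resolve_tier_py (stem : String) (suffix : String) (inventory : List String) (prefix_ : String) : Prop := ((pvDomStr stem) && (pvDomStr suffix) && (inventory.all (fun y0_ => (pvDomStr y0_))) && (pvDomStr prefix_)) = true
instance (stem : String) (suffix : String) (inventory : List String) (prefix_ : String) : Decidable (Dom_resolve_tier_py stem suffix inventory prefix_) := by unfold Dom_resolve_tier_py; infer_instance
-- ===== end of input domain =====

-- B replaces A's two membership scans plus filtered-sort-then-head by a single classifying
-- pass keeping two flags and a running lexicographic minimum (objective: one-pass alternative).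

-- ===== PORT A =====
def resolve_tier_py (stem : String) (suffix : String) (inventory : List String) (prefix_ : String) : Option String :=
  let tried : List String := [prefix_ ++ suffix ++ ".webp", prefix_ ++ stem ++ ".webp"]
  match tried.find? (fun c => decide (c ∈ inventory)) with
  | some c => some c
  | none =>
      let variants := PySem.List.sorted (inventory.filter
          (fun p => PySem.Str.startswith p (prefix_ ++ stem ++ "_") && !decide (p ∈ tried))) (fun x => x) false
      match variants with
      | v :: _ => some v
      | [] => none

-- ===== PORT B =====
def resolve_tier_py_alt (stem : String) (suffix : String) (inventory : List String) (prefix_ : String) : Option String :=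
  let exact := prefix_ ++ suffix ++ ".webp"
  let bare := prefix_ ++ stem ++ ".webp"
  let vpre := prefix_ ++ stem ++ "_"
  let st := inventory.foldl (fun (s : Bool × Bool × Option String) p =>
      if p = exact then (true, s.2.1, s.2.2)
      else if p = bare then (s.1, true, s.2.2)
      else if PySem.Str.startswith p vpre &&
              (match s.2.2 with | none => true | some q => decide (p < q))
        then (s.1, s.2.1, some p)
        else s) (false, false, none)
  if st.1 then some exact
  else if st.2.1 then some bare
  else st.2.2

-- ===== PRECONDITION & SPEC =====
def Spec_resolve_tier_py (stem : String) (suffix : String) (inventory : List String) (prefix_ : String) (out : Option String) : Prop := out = resolve_tier_py_alt stem suffix inventory prefix_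
instance (stem : String) (suffix : String) (inventory : List String) (prefix_ : String) (out : Option String) : Decidable (Spec_resolve_tier_py stem suffix inventory prefix_ out) := by unfold Spec_resolve_tier_py; infer_instance

-- ===== CLAIM (what is proved, stated in full; the proofs are below) =====
def Claim_equal_resolve_tier_py : Prop := ∀ (stem : String) (suffix : String) (inventory : List String) (prefix_ : String), Dom_resolve_tier_py stem suffix inventory prefix_ → Spec_resolve_tier_py stem suffix inventory prefix_ (resolve_tier_py stem suffix inventory prefix_)

-- ===== LEMMAS AND PROOFS =====

/-- running-minimum step (ties keep the earlier element) -/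
def pvMinStep (m : Option String) (p : String) : Option String :=
  match m with
  | none => some p
  | some q => if p < q then some p else some q

/-- B's loop body, named for the proofs (definitionally the lambda in the port). -/
abbrev pvStepB (e b v : String) (s : Bool × Bool × Option String) (p : String) :
    Bool × Bool × Option String :=
  if p = e then (true, s.2.1, s.2.2)
  else if p = b then (s.1, true, s.2.2)
  else if PySem.Str.startswith p v &&
          (match s.2.2 with | none => true | some q => decide (p < q))
    then (s.1, s.2.1, some p)
    else s

def pvPred (e b v : String) (p : String) : Bool :=
  !decide (p = e) && !decide (p = b) && PySem.Str.startswith p v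

/-- B's fold computes: exact present?, bare present (among non-exact)?, running min of variants. -/
theorem pvFoldB (e b v : String) (l : List String) (s : Bool × Bool × Option String) :
    l.foldl (pvStepB e b v) s
    = (s.1 || decide (e ∈ l),
       s.2.1 || l.any (fun p => !decide (p = e) && decide (p = b)),
       (l.filter (pvPred e b v)).foldl pvMinStep s.2.2) := by
  induction l generalizing s with
  | nil => simp
  | cons p t ih =>
      rw [List.foldl_cons]
      by_cases hpe : p = e
      · have hstep : pvStepB e b v s p = (true, s.2.1, s.2.2) := by
          unfold pvStepB; rw [if_pos hpe]
        rw [hstep, ih]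
        subst hpe
        simp [pvPred]
      · by_cases hpb : p = b
        · have hstep : pvStepB e b v s p = (s.1, true, s.2.2) := by
            unfold pvStepB; rw [if_neg hpe, if_pos hpb]
          rw [hstep, ih]
          subst hpb
          have heb : ¬ e = p := fun h => hpe h.symm
          simp [pvPred, hpe, heb]
        · have hun : pvStepB e b v s p =
              (if PySem.Str.startswith p v &&
                  (match s.2.2 with | none => true | some q => decide (p < q))
                then (s.1, s.2.1, some p) else s) := by
            unfold pvStepB; rw [if_neg hpe, if_neg hpb]
          by_cases hsw : PySem.Chars.startswith p.toList v.toList = true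
          · have hstep : pvStepB e b v s p = (s.1, s.2.1, pvMinStep s.2.2 p) := by
              rw [hun]
              cases hm : s.2.2 with
              | none => simp [pvMinStep, hsw]
              | some q =>
                  by_cases hlt : p < q
                  · simp [pvMinStep, hsw, hlt]
                  · simp [pvMinStep, hsw, hlt]
                    rw [← hm]
            rw [hstep, ih]
            have hf : List.filter (pvPred e b v) (p :: t) = p :: List.filter (pvPred e b v) t := by
              simp [pvPred, hpe, hpb, hsw]
            rw [hf, List.foldl_cons]
            simp [hpe, Ne.symm hpe, hpb]
          · have hsw' : PySem.Chars.startswith p.toList v.toList = false := by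
              cases h : PySem.Chars.startswith p.toList v.toList; rfl; exact absurd h hsw
            have hstep : pvStepB e b v s p = s := by
              rw [hun]
              cases hm : s.2.2 with
              | none => simp [hsw']
              | some q => simp [hsw']
            rw [hstep, ih]
            have hf : List.filter (pvPred e b v) (p :: t) = List.filter (pvPred e b v) t := by
              simp [pvPred, hsw']
            rw [hf]
            simp [hpe, Ne.symm hpe, hpb]

/-- head of insertBy -/
theorem pvHeadInsertBy (x : String) (ys : List String) :
    (PySem.List.insertBy (fun a b => decide (a < b)) x ys).head? = pvMinStep ys.head? x := by
  cases ys with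
  | nil => simp [PySem.List.insertBy, pvMinStep]
  | cons y t =>
      by_cases h : x < y
      · simp [PySem.List.insertBy, pvMinStep, h]
      · simp [PySem.List.insertBy, pvMinStep, h]

theorem pvSortedHeadAux (ys : List String) (acc : List String) :
    (ys.foldl (fun acc x => PySem.List.insertBy (fun a b => decide (a < b)) x acc) acc).head?
      = ys.foldl pvMinStep acc.head? := by
  induction ys generalizing acc with
  | nil => rfl
  | cons x t ih =>
      simp only [List.foldl_cons, ih, pvHeadInsertBy]

/-- head of the stable sort = running minimum keeping the first tie -/
theorem pvSortedHead (ys : List String) :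
    (PySem.List.sorted ys (fun x => x) false).head? = ys.foldl pvMinStep none := by
  rw [PySem.List.sorted_eq_foldl_insertBy]
  exact pvSortedHeadAux ys []

theorem pvAnyEqContains (e b : String) (l : List String) (he : e ∉ l) :
    l.any (fun p => !decide (p = e) && decide (p = b)) = decide (b ∈ l) := by
  induction l with
  | nil => rfl
  | cons p t ih =>
      simp only [List.mem_cons, not_or] at he
      have hpe : ¬ p = e := fun h => he.1 h.symm
      simp [List.any_cons, ih he.2, hpe, @eq_comm _ p b]

/-- the whole equivalence, generalized over the three constructed names -/
theorem pvMain (e b v : String) (inv : List String) :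
    (match [e, b].find? (fun c => decide (c ∈ inv)) with
     | some c => some c
     | none =>
         match PySem.List.sorted (inv.filter
             (fun p => PySem.Str.startswith p v && !decide (p ∈ [e, b]))) (fun x => x) false with
         | w :: _ => some w
         | [] => none)
    = (let st := inv.foldl (pvStepB e b v) (false, false, none)
       if st.1 then some e else if st.2.1 then some b else st.2.2) := by
  rw [pvFoldB]
  simp only [Bool.false_or]
  by_cases hce : e ∈ inv
  · simp [List.find?, hce]
  · rw [pvAnyEqContains e b inv hce]
    by_cases hcb : b ∈ inv
    · simp [List.find?, hce, hcb]
    · simp only [List.find?, hce, hcb, decide_false]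
      have hfil : inv.filter (fun p => PySem.Str.startswith p v && !decide (p ∈ [e, b]))
          = inv.filter (pvPred e b v) := by
        apply List.filter_congr
        intro p _
        by_cases hpe : p = e <;> by_cases hpb : p = b <;>
          cases hsw : PySem.Chars.startswith p.toList v.toList <;>
          simp [pvPred, hpe, hpb, hsw]
      rw [hfil, ← pvSortedHead]
      cases PySem.List.sorted (inv.filter (pvPred e b v)) (fun x => x) false with
      | nil => simp
      | cons w t => simp

-- ===== VERDICT (by name: the statement is the Claim_ definition above) =====
theorem resolve_tier_py_spec : Claim_equal_resolve_tier_py := by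
  intro stem suffix inventory prefix_ _
  show resolve_tier_py stem suffix inventory prefix_ = resolve_tier_py_alt stem suffix inventory prefix_
  unfold resolve_tier_py resolve_tier_py_alt
  exact pvMain (prefix_ ++ suffix ++ ".webp") (prefix_ ++ stem ++ ".webp") (prefix_ ++ stem ++ "_") inventory
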